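-- pv_equiv track=rewrite | github.com/Perniska/overenyDoktor | data/evuc_pipeline.py | build_start_urls
-- ===== SOURCE A (Python) =====
-- from typing import Any, Optional
--
-- BASE_DOMAIN = "www.e-vuc.sk"
--
-- REGION_NAMES: dict[str, str] = {
--     "bsk": "Bratislavský samosprávny kraj",
--     "ttsk": "Trnavský samosprávny kraj",
--     "tsk": "Trenčiansky samosprávny kraj",
--     "nsk": "Nitriansky samosprávny kraj",
--     "zsk": "Žilinský samosprávny kraj",
--     "bbsk": "Banskobystrický samosprávny kraj",
--     "psk": "Prešovský samosprávny kraj",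
--     "ksk": "Košický samosprávny kraj",
-- }
--
-- CATEGORY_SEEDS: list[str] = [
--     "zdravotnictvo",
--     "zdravotnictvo/ambulantne-zdravotnicke-zariadenia",
--     "zdravotnictvo/ustavne-zdravotnicke-zariadenia",
--     "zdravotnictvo/lekarne",
--     "zdravotnictvo/vydajne-zdravotnickych-pomocok",
-- ]
--
-- def build_start_urls(selected_regions: Optional[list[str]] = None) -> list[str]:
--     regions = selected_regions or list(REGION_NAMES.keys())
--     urls: list[str] = []
--     for region in regions:
--         region = region.strip().lower()
--         if region not in REGION_NAMES:
--             continue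
--         for category in CATEGORY_SEEDS:
--             urls.append(f"https://{BASE_DOMAIN}/{region}/{category}.html")
--             urls.append(f"https://{BASE_DOMAIN}/{region}/{category}/")
--     return list(dict.fromkeys(urls))
-- ===== SOURCE B (Python) =====
-- from typing import Any, Optional
--
-- BASE_DOMAIN = "www.e-vuc.sk"
--
-- REGION_NAMES: dict[str, str] = {
--     "bsk": "Bratislavský samosprávny kraj",
--     "ttsk": "Trnavský samosprávny kraj",
--     "tsk": "Trenčiansky samosprávny kraj",
--     "nsk": "Nitriansky samosprávny kraj",
--     "zsk": "Žilinský samosprávny kraj",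
--     "bbsk": "Banskobystrický samosprávny kraj",
--     "psk": "Prešovský samosprávny kraj",
--     "ksk": "Košický samosprávny kraj",
-- }
--
-- CATEGORY_SEEDS: list[str] = [
--     "zdravotnictvo",
--     "zdravotnictvo/ambulantne-zdravotnicke-zariadenia",
--     "zdravotnictvo/ustavne-zdravotnicke-zariadenia",
--     "zdravotnictvo/lekarne",
--     "zdravotnictvo/vydajne-zdravotnickych-pomocok",
-- ]
--
-- # The whole universe of possible output blocks is fixed at import time:
-- # one precomputed URL block per region key.  A call is then a single pass
-- # over the input with a seen-set, extending the output with table lookups —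
-- # no URL formatting and no dedup pass at call time.
-- URLS_BY_REGION: dict[str, list[str]] = {
--     region: [
--         url
--         for category in CATEGORY_SEEDS
--         for url in (f"https://{BASE_DOMAIN}/{region}/{category}.html",
--                     f"https://{BASE_DOMAIN}/{region}/{category}/")
--     ]
--     for region in REGION_NAMES
-- }
--
-- def build_start_urls(selected_regions: Optional[list[str]] = None) -> list[str]:
--     urls: list[str] = []
--     seen: set[str] = set()
--     for raw in (selected_regions or REGION_NAMES):
--         region = raw.strip().lower()
--         block = URLS_BY_REGION.get(region)
--         if block is not None and region not in seen:
--             seen.add(region)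
--             urls.extend(block)
--     return urls
-- ===== Notes on version B (the rewrite author's own statement) =====
-- stated objective: alternative
-- what changed: B precomputes a module-level dict mapping each region key to its ten URLs and answers a call with a single pass over the input regions using an explicit seen-set, extending the output with table lookups; A formats every URL inside a nested loop at call time and deduplicates the whole URL list at the end.
import Mathlib
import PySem

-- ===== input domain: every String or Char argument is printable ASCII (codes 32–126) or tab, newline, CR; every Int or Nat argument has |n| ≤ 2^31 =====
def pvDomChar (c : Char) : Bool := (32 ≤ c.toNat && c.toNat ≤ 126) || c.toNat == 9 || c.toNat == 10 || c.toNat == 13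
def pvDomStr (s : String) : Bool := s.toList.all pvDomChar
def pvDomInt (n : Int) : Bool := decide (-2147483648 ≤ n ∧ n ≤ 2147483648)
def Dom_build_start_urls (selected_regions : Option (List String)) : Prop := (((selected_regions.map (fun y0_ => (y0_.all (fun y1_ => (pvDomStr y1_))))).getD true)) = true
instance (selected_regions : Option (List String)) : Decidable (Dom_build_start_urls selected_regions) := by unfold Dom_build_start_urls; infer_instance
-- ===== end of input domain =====

-- B precomputes a fixed region->URL-block table at module level and answers a call with a single
-- pass over the input using a seen-set and table lookups, with no URL formatting and no final
-- dedup pass at call time (objective: alternative).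


-- shared module constants (list(REGION_NAMES.keys()) and CATEGORY_SEEDS)
def pvRegionKeys : List String := ["bsk", "ttsk", "tsk", "nsk", "zsk", "bbsk", "psk", "ksk"]

def pvCategorySeeds : List String :=
  ["zdravotnictvo",
   "zdravotnictvo/ambulantne-zdravotnicke-zariadenia",
   "zdravotnictvo/ustavne-zdravotnicke-zariadenia",
   "zdravotnictvo/lekarne",
   "zdravotnictvo/vydajne-zdravotnickych-pomocok"]

-- ===== PORT A =====
def build_start_urls (selected_regions : Option (List String)) : List String :=
  -- regions = selected_regions or list(REGION_NAMES.keys())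
  let regions : List String :=
    match selected_regions with
    | none => pvRegionKeys
    | some l => if l = [] then pvRegionKeys else l
  let urls : List String :=
    regions.foldl (fun urls region =>
      let region := PySem.Str.lower (PySem.Str.strip region)
      if pvRegionKeys.contains region then
        pvCategorySeeds.foldl (fun urls category =>
          urls ++ ["https://" ++ "www.e-vuc.sk" ++ "/" ++ region ++ "/" ++ category ++ ".html",
                   "https://" ++ "www.e-vuc.sk" ++ "/" ++ region ++ "/" ++ category ++ "/"]) urls
      else urls) []
  PySem.List.dedup urls

-- ===== PORT B =====
-- URLS_BY_REGION: the module-level dict comprehension (region -> its URL block)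
def pvUrlTable : PySem.Dict String (List String) :=
  pvRegionKeys.foldl (fun d region =>
    PySem.Dict.insert d region
      (pvCategorySeeds.flatMap (fun category =>
        ["https://" ++ "www.e-vuc.sk" ++ "/" ++ region ++ "/" ++ category ++ ".html",
         "https://" ++ "www.e-vuc.sk" ++ "/" ++ region ++ "/" ++ category ++ "/"])))
    PySem.Dict.empty

def build_start_urls_alt (selected_regions : Option (List String)) : List String :=
  let regions : List String :=
    match selected_regions with
    | none => pvRegionKeys
    | some l => if l = [] then pvRegionKeys else l
  (regions.foldl (fun (st : List String × PySem.Set String) raw =>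
      let region := PySem.Str.lower (PySem.Str.strip raw)
      match PySem.Dict.get? pvUrlTable region with
      | some block =>
          if PySem.Set.contains st.2 region then st
          else (st.1 ++ block, PySem.Set.add st.2 region)
      | none => st) ([], PySem.Set.empty)).1

-- ===== PRECONDITION & SPEC =====
def Spec_build_start_urls (selected_regions : Option (List String)) (out : List String) : Prop := out = build_start_urls_alt selected_regions
instance (selected_regions : Option (List String)) (out : List String) : Decidable (Spec_build_start_urls selected_regions out) := by unfold Spec_build_start_urls; infer_instance

-- ===== CLAIM (what is proved, stated in full; the proofs are below) =====
def Claim_equal_build_start_urls : Prop := ∀ (selected_regions : Option (List String)), Dom_build_start_urls selected_regions → Spec_build_start_urls selected_regions (build_start_urls selected_regions)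

-- ===== LEMMAS AND PROOFS =====

-- the ten URLs one valid region contributes
def pvF (region : String) : List String :=
  pvCategorySeeds.flatMap (fun category =>
    ["https://" ++ "www.e-vuc.sk" ++ "/" ++ region ++ "/" ++ category ++ ".html",
     "https://" ++ "www.e-vuc.sk" ++ "/" ++ region ++ "/" ++ category ++ "/"])

-- the table answers exactly the region keys, with pvF as the block
theorem pv_get_table (r : String) :
    PySem.Dict.get? pvUrlTable r = if pvRegionKeys.contains r then some (pvF r) else none := by
  simp only [pvUrlTable, pvRegionKeys, List.foldl_cons, List.foldl_nil,
    PySem.Dict.get?_insert, PySem.Dict.get?_empty, List.contains_eq_mem, List.mem_cons,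
    List.not_mem_nil, or_false, pvF]
  split_ifs <;> simp_all

-- folding Set.add over elements already seen changes nothing
theorem pv_foldl_add_mem {β : Type} [BEq β] [LawfulBEq β] (seen m : List β)
    (h : ∀ x ∈ m, x ∈ seen) : List.foldl PySem.Set.add seen m = seen := by
  induction m with
  | nil => rfl
  | cons x m ih =>
    have hx : x ∈ seen := h x (List.mem_cons_self)
    simp only [List.foldl_cons, PySem.Set.add]
    rw [if_pos (by simpa using hx)]
    exact ih (fun y hy => h y (List.mem_cons_of_mem _ hy))

-- A's nested loop builds exactly the flatMap of pvF over the normalized valid regions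
theorem pv_loopA (regions : List String) (urls : List String) :
    regions.foldl (fun urls region =>
      if pvRegionKeys.contains (PySem.Str.lower (PySem.Str.strip region)) then
        pvCategorySeeds.foldl (fun urls category =>
          urls ++ ["https://" ++ "www.e-vuc.sk" ++ "/" ++ PySem.Str.lower (PySem.Str.strip region) ++ "/" ++ category ++ ".html",
                   "https://" ++ "www.e-vuc.sk" ++ "/" ++ PySem.Str.lower (PySem.Str.strip region) ++ "/" ++ category ++ "/"]) urls
      else urls) urls
    = urls ++ ((regions.map (fun s => PySem.Str.lower (PySem.Str.strip s))).filter
        (fun r => pvRegionKeys.contains r)).flatMap pvF := by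
  induction regions generalizing urls with
  | nil => simp
  | cons r rs ih =>
    simp only [List.foldl_cons, List.map_cons, List.filter_cons]
    by_cases h : pvRegionKeys.contains (PySem.Str.lower (PySem.Str.strip r))
    · rw [if_pos h, PySem.List.foldl_append_eq_flatMap, ih, h]
      simp [pvF]
    · rw [if_neg h, ih]
      simp only [Bool.not_eq_true] at h
      rw [h]
      simp

-- folding Set.add over fresh, duplicate-free elements appends them all
theorem pv_foldl_add_fresh {β : Type} [BEq β] [LawfulBEq β] (seen m : List β)
    (hn : m.Nodup) (h : ∀ x ∈ m, x ∉ seen) : List.foldl PySem.Set.add seen m = seen ++ m := by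
  induction m generalizing seen with
  | nil => simp
  | cons x m ih =>
    have hx : x ∉ seen := h x (List.mem_cons_self)
    simp only [List.foldl_cons, PySem.Set.add]
    rw [if_neg (by simpa using hx)]
    rw [ih (seen ++ [x]) hn.of_cons]
    · simp
    · intro y hy
      simp only [List.mem_append, List.mem_singleton]
      rintro (hs | rfl)
      · exact h y (List.mem_cons_of_mem _ hy) hs
      · exact (List.nodup_cons.mp hn).1 hy

-- deduping a flatMap of pairwise-disjoint duplicate-free blocks = flatMap of the deduped index list
theorem pv_dedup_flatMap {α β : Type} [BEq α] [LawfulBEq α] [BEq β] [LawfulBEq β]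
    (f : α → List β) (u : List α)
    (hnd : ∀ a ∈ u, (f a).Nodup)
    (hdisj : ∀ a ∈ u, ∀ b ∈ u, a ≠ b → ∀ x ∈ f a, x ∉ f b) :
    ∀ (l D : List α), (∀ a ∈ l, a ∈ u) → (∀ a ∈ D, a ∈ u) →
      List.foldl PySem.Set.add (D.flatMap f) (l.flatMap f)
        = (List.foldl PySem.Set.add D l).flatMap f := by
  intro l
  induction l with
  | nil => intro D _ _; rfl
  | cons a l ih =>
    intro D hl hD
    have ha : a ∈ u := hl a (List.mem_cons_self)
    have hl' : ∀ x ∈ l, x ∈ u := fun x hx => hl x (List.mem_cons_of_mem _ hx)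
    simp only [List.flatMap_cons, List.foldl_cons, List.foldl_append]
    by_cases hmem : a ∈ D
    · rw [pv_foldl_add_mem (D.flatMap f) (f a)
        (fun x hx => List.mem_flatMap.mpr ⟨a, hmem, hx⟩)]
      rw [show PySem.Set.add D a = D by
        simp only [PySem.Set.add]; rw [if_pos (by simpa using hmem)]]
      exact ih D hl' hD
    · rw [pv_foldl_add_fresh (D.flatMap f) (f a) (hnd a ha)]
      · rw [show PySem.Set.add D a = D ++ [a] by
          simp only [PySem.Set.add]; rw [if_neg (by simpa using hmem)]]
        rw [show D.flatMap f ++ f a = (D ++ [a]).flatMap f by simp]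
        refine ih (D ++ [a]) hl' ?_
        intro x hx
        rcases List.mem_append.mp hx with hs | hs
        · exact hD x hs
        · simpa using (List.mem_singleton.mp hs ▸ ha)
      · intro x hx hmem'
        rcases List.mem_flatMap.mp hmem' with ⟨b, hb, hxb⟩
        exact hdisj a ha b (hD b hb) (fun h => hmem (h ▸ hb)) x hx hxb

set_option maxHeartbeats 4000000 in
-- the blocks of pvF over the region keys are duplicate-free
theorem pv_blocks_nodup : ∀ a ∈ pvRegionKeys, (pvF a).Nodup := by decide

set_option maxHeartbeats 4000000 in
-- distinct region keys produce disjoint URL blocks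
theorem pv_blocks_disjoint :
    ∀ a ∈ pvRegionKeys, ∀ b ∈ pvRegionKeys, a ≠ b → ∀ x ∈ pvF a, x ∉ pvF b := by decide

theorem pv_filter_mem_keys (regions : List String) :
    ∀ a ∈ (regions.map (fun s => PySem.Str.lower (PySem.Str.strip s))).filter
        (fun r => pvRegionKeys.contains r), a ∈ pvRegionKeys := by
  intro a ha
  have := List.of_mem_filter ha
  simpa using this

-- dedup commutes with flatMap of disjoint nodup blocks (corollary in dedup form)
theorem pv_dedup_flatMap' {α β : Type} [BEq α] [LawfulBEq α] [BEq β] [LawfulBEq β]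
    (f : α → List β) (u : List α)
    (hnd : ∀ a ∈ u, (f a).Nodup)
    (hdisj : ∀ a ∈ u, ∀ b ∈ u, a ≠ b → ∀ x ∈ f a, x ∉ f b)
    (l : List α) (hl : ∀ a ∈ l, a ∈ u) :
    PySem.List.dedup (l.flatMap f) = (PySem.List.dedup l).flatMap f := by
  have h := pv_dedup_flatMap f u hnd hdisj l [] hl (by intro a ha; cases ha)
  simpa [PySem.List.dedup, PySem.Set.ofList, PySem.Set.empty] using h

-- the table-lookup step of B, rewritten through pv_get_table into an explicit membership test
theorem pv_stepB_eq :
    (fun (st : List String × PySem.Set String) raw =>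
      let region := PySem.Str.lower (PySem.Str.strip raw)
      match PySem.Dict.get? pvUrlTable region with
      | some block =>
          if PySem.Set.contains st.2 region then st
          else (st.1 ++ block, PySem.Set.add st.2 region)
      | none => st)
    = (fun (st : List String × PySem.Set String) raw =>
      if pvRegionKeys.contains (PySem.Str.lower (PySem.Str.strip raw)) then
        (if PySem.Set.contains st.2 (PySem.Str.lower (PySem.Str.strip raw)) then st
         else (st.1 ++ pvF (PySem.Str.lower (PySem.Str.strip raw)),
               PySem.Set.add st.2 (PySem.Str.lower (PySem.Str.strip raw))))
      else st) := by
  funext st raw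
  show (match PySem.Dict.get? pvUrlTable (PySem.Str.lower (PySem.Str.strip raw)) with
        | some block =>
            if PySem.Set.contains st.2 (PySem.Str.lower (PySem.Str.strip raw)) then st
            else (st.1 ++ block, PySem.Set.add st.2 (PySem.Str.lower (PySem.Str.strip raw)))
        | none => st) = _
  rw [pv_get_table]
  by_cases hk : pvRegionKeys.contains (PySem.Str.lower (PySem.Str.strip raw))
  · rw [if_pos hk, if_pos hk]
  · rw [if_neg hk, if_neg hk]

-- B's single pass with a seen-set builds the flatMap of pvF over the Set.add-fold of the valid regions
theorem pv_loopB (regions : List String) (D : List String) :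
    (regions.foldl (fun (st : List String × PySem.Set String) raw =>
      if pvRegionKeys.contains (PySem.Str.lower (PySem.Str.strip raw)) then
        (if PySem.Set.contains st.2 (PySem.Str.lower (PySem.Str.strip raw)) then st
         else (st.1 ++ pvF (PySem.Str.lower (PySem.Str.strip raw)),
               PySem.Set.add st.2 (PySem.Str.lower (PySem.Str.strip raw))))
      else st) (D.flatMap pvF, D)).1
    = (List.foldl PySem.Set.add D ((regions.map (fun s => PySem.Str.lower (PySem.Str.strip s))).filter
        (fun r => pvRegionKeys.contains r))).flatMap pvF := by
  induction regions generalizing D with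
  | nil => simp
  | cons r rs ih =>
    simp only [List.foldl_cons, List.map_cons, List.filter_cons]
    by_cases hk : pvRegionKeys.contains (PySem.Str.lower (PySem.Str.strip r))
    · rw [if_pos hk, hk]
      simp only [if_true, List.foldl_cons]
      by_cases hs : PySem.Str.lower (PySem.Str.strip r) ∈ D
      · rw [if_pos (by simp [hs])]
        rw [show PySem.Set.add D (PySem.Str.lower (PySem.Str.strip r)) = D from by
          simp [PySem.Set.add, hs]]
        exact ih D
      · rw [if_neg (by simp [hs])]
        rw [show PySem.Set.add D (PySem.Str.lower (PySem.Str.strip r))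
              = D ++ [PySem.Str.lower (PySem.Str.strip r)] from by
          simp [PySem.Set.add, hs]]
        have h2 := ih (D ++ [PySem.Str.lower (PySem.Str.strip r)])
        simpa using h2
    · rw [if_neg hk]
      simp only [Bool.not_eq_true] at hk
      rw [hk]
      simp only [Bool.false_eq_true, if_false]
      exact ih D

-- the whole pipeline, for an arbitrary region list
theorem pv_main (regions : List String) :
    PySem.List.dedup (regions.foldl (fun urls region =>
      if pvRegionKeys.contains (PySem.Str.lower (PySem.Str.strip region)) then
        pvCategorySeeds.foldl (fun urls category =>
          urls ++ ["https://" ++ "www.e-vuc.sk" ++ "/" ++ PySem.Str.lower (PySem.Str.strip region) ++ "/" ++ category ++ ".html",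
                   "https://" ++ "www.e-vuc.sk" ++ "/" ++ PySem.Str.lower (PySem.Str.strip region) ++ "/" ++ category ++ "/"]) urls
      else urls) [])
    = (regions.foldl (fun (st : List String × PySem.Set String) raw =>
      let region := PySem.Str.lower (PySem.Str.strip raw)
      match PySem.Dict.get? pvUrlTable region with
      | some block =>
          if PySem.Set.contains st.2 region then st
          else (st.1 ++ block, PySem.Set.add st.2 region)
      | none => st) ([], PySem.Set.empty)).1 := by
  rw [pv_stepB_eq]
  have hB := pv_loopB regions []
  simp only [List.flatMap_nil] at hB
  rw [show (PySem.Set.empty : PySem.Set String) = ([] : List String) from rfl]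
  rw [hB]
  rw [pv_loopA regions []]
  simp only [List.nil_append]
  rw [pv_dedup_flatMap' pvF pvRegionKeys pv_blocks_nodup pv_blocks_disjoint _
    (pv_filter_mem_keys regions)]
  congr 1

-- ===== VERDICT (by name: the statement is the Claim_ definition above) =====
theorem build_start_urls_spec : Claim_equal_build_start_urls := by
  intro sel _
  show build_start_urls sel = build_start_urls_alt sel
  unfold build_start_urls build_start_urls_alt
  exact pv_main _
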